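-- pv_equiv track=rewrite | github.com/qwertyoutreach7-design/rolex | app.py | is_target_domain
-- ===== SOURCE A (Python) =====
-- def normalize_domain(domain: str) -> str:
--     d = (domain or "").strip().lower()
--     if d.startswith("www."):
--         d = d[4:]
--     return d
--
-- def is_target_domain(domain: str, target_domains) -> bool:
--     """
--     Перевіряє, чи domain є таргетним (www. ігнорується):
--     - exact match: example.com
--     - або субдомен: casino.example.com для example.com
--     """
--     d = normalize_domain(domain)
--     for t in target_domains:
--         t_norm = normalize_domain(t)
--         if not t_norm:
--             continue
--         if d == t_norm or d.endswith("." + t_norm):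
--             return True
--     return False
-- ===== SOURCE B (Python) =====
-- def normalize_domain(domain: str) -> str:
--     d = (domain or "").strip().lower()
--     if d.startswith("www."):
--         d = d[4:]
--     return d
--
-- def is_target_domain(domain: str, target_domains) -> bool:
--     # Build the set of all dot-boundary suffixes of the normalized domain once,
--     # then test each normalized target by set membership.
--     d = normalize_domain(domain)
--     suffixes = {d}
--     for i, ch in enumerate(d):
--         if ch == ".":
--             suffixes.add(d[i + 1:])
--     for t in target_domains:
--         t_norm = normalize_domain(t)
--         if t_norm and t_norm in suffixes:
--             return True
--     return False
-- ===== Notes on version B (the rewrite author's own statement) =====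
-- stated objective: alternative
-- what changed: B precomputes the set of all dot-boundary suffixes of the normalized domain in one scan and replaces A's per-target endswith test with a set-membership lookup.
import Mathlib
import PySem

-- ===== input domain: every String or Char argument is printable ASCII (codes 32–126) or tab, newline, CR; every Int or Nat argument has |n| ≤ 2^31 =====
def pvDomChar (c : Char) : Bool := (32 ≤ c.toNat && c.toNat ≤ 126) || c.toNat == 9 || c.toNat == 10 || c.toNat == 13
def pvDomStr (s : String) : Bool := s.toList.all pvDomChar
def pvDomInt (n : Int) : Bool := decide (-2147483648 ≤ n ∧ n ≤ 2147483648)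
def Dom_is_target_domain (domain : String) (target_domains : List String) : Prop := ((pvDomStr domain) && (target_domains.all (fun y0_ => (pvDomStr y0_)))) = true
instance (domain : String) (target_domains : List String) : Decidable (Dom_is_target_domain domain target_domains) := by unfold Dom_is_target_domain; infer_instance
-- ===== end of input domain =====

-- B replaces A's per-target endswith test by membership in a precomputed set of all
-- dot-boundary suffixes of the normalized domain (objective: alternative algorithm).

-- ===== PORT A =====
-- normalize_domain, shared helper (both Source A and Source B define this identical helper);
-- works on List Char ('(domain or "")' equals domain: '' or "" is "" either way)
def pvNorm (domain : String) : List Char :=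
  let d := PySem.Chars.lower (PySem.Chars.strip domain.toList)
  if PySem.Chars.startswith d "www.".toList then PySem.List.slice d (some 4) none else d

-- A's loop over target_domains
def pvLoopA (d : List Char) : List String → Bool
  | [] => false
  | t :: rest =>
    let tn := pvNorm t
    if tn = [] then pvLoopA d rest
    else if d = tn ∨ PySem.Chars.endswith d ('.' :: tn) then true
    else pvLoopA d rest

def is_target_domain (domain : String) (target_domains : List String) : Bool :=
  pvLoopA (pvNorm domain) target_domains

-- ===== PORT B =====
-- 'for i, ch in enumerate(d): if ch == ".": suffixes.add(d[i+1:])'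
def pvSufLoop (d : List Char) : List (Int × Char) → PySem.Set (List Char) → PySem.Set (List Char)
  | [], s => s
  | (i, ch) :: rest, s =>
    pvSufLoop d rest (if ch = '.' then PySem.Set.add s (PySem.List.slice d (some (i + 1)) none) else s)

def pvSuffixes (d : List Char) : PySem.Set (List Char) :=
  pvSufLoop d (PySem.List.enumerate d 0) (PySem.Set.ofList [d])

-- B's loop over target_domains: membership in the suffix set
def pvLoopB (sufs : PySem.Set (List Char)) : List String → Bool
  | [] => false
  | t :: rest =>
    let tn := pvNorm t
    if tn ≠ [] ∧ PySem.Set.contains sufs tn then true else pvLoopB sufs rest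

def is_target_domain_alt (domain : String) (target_domains : List String) : Bool :=
  let d := pvNorm domain
  pvLoopB (pvSuffixes d) target_domains

-- ===== PRECONDITION & SPEC =====
def Spec_is_target_domain (domain : String) (target_domains : List String) (out : Bool) : Prop := out = is_target_domain_alt domain target_domains
instance (domain : String) (target_domains : List String) (out : Bool) : Decidable (Spec_is_target_domain domain target_domains out) := by unfold Spec_is_target_domain; infer_instance

-- ===== CLAIM (what is proved, stated in full; the proofs are below) =====
def Claim_equal_is_target_domain : Prop := ∀ (domain : String) (target_domains : List String), Dom_is_target_domain domain target_domains → Spec_is_target_domain domain target_domains (is_target_domain domain target_domains)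

-- ===== LEMMAS AND PROOFS =====

-- membership in the suffix-building fold
theorem mem_pvSufLoop (d : List Char) (l : List (Int × Char)) (s : PySem.Set (List Char)) (x : List Char) :
    x ∈ pvSufLoop d l s ↔ x ∈ s ∨ ∃ p ∈ l, p.2 = '.' ∧ x = PySem.List.slice d (some (p.1 + 1)) none := by
  induction l generalizing s with
  | nil => simp [pvSufLoop]
  | cons p rest ih =>
    obtain ⟨i, ch⟩ := p
    simp only [pvSufLoop, ih, List.mem_cons]
    split_ifs with hc
    · subst hc
      simp only [PySem.Set.mem_add]
      aesop
    · aesop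

-- characterization of the suffix set
theorem mem_pvSuffixes (d x : List Char) :
    x ∈ pvSuffixes d ↔ x = d ∨ ∃ k : Nat, ∃ h : k < d.length, d[k] = '.' ∧ x = d.drop (k + 1) := by
  unfold pvSuffixes
  rw [mem_pvSufLoop]
  simp only [PySem.Set.mem_ofList, List.mem_singleton]
  constructor
  · rintro (h | ⟨p, hp, hdot, hx⟩)
    · exact Or.inl h
    · rw [PySem.List.mem_enumerate_iff] at hp
      obtain ⟨k, hk, rfl⟩ := hp
      refine Or.inr ⟨k, hk, by simpa using hdot, ?_⟩
      rw [hx]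
      have : (0 : Int) + k + 1 = ((k + 1 : Nat) : Int) := by push_cast; ring
      rw [this, PySem.List.slice_from_natCast]
  · rintro (h | ⟨k, hk, hdot, hx⟩)
    · exact Or.inl h
    · refine Or.inr ⟨(0 + (k : Int), d[k]), ?_, by simpa using hdot, ?_⟩
      · rw [PySem.List.mem_enumerate_iff]; exact ⟨k, hk, rfl⟩
      · rw [hx]
        have : (0 : Int) + k + 1 = ((k + 1 : Nat) : Int) := by push_cast; ring
        simp only [this, PySem.List.slice_from_natCast]

-- A's per-target test equals membership in the suffix set
theorem test_eq_mem (d tn : List Char) :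
    (d = tn ∨ PySem.Chars.endswith d ('.' :: tn) = true) ↔ tn ∈ pvSuffixes d := by
  rw [mem_pvSuffixes, PySem.Chars.endswith_iff]
  constructor
  · rintro (rfl | h)
    · exact Or.inl rfl
    · obtain ⟨pre, rfl⟩ := h
      refine Or.inr ⟨pre.length, by simp, ?_, ?_⟩
      · rw [List.getElem_append_right (le_refl pre.length)]
        simp
      · have h2 : (pre ++ '.' :: tn).drop (pre.length + 1) = tn := by
          rw [show pre ++ '.' :: tn = (pre ++ ['.']) ++ tn by simp,
              show pre.length + 1 = (pre ++ ['.']).length by simp, List.drop_left]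
        exact h2.symm
  · rintro (rfl | ⟨k, hk, hdot, rfl⟩)
    · exact Or.inl rfl
    · refine Or.inr ?_
      have h1 : '.' :: d.drop (k + 1) = d.drop k := by
        rw [← hdot]; exact List.getElem_cons_drop ..
      rw [h1]
      exact List.drop_suffix k d

-- the two target loops agree
theorem loops_eq (d : List Char) (ts : List String) :
    pvLoopA d ts = pvLoopB (pvSuffixes d) ts := by
  induction ts with
  | nil => rfl
  | cons t rest ih =>
    simp only [pvLoopA, pvLoopB]
    by_cases he : pvNorm t = []
    · rw [if_pos he, if_neg (fun h => h.1 he), ih]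
    · rw [if_neg he]
      by_cases hm : pvNorm t ∈ pvSuffixes d
      · have hc : (pvSuffixes d).contains (pvNorm t) = true := by
          simpa [PySem.Set.contains_iff] using hm
        rw [if_pos ((test_eq_mem d (pvNorm t)).mpr hm), if_pos ⟨he, hc⟩]
      · have hc : ¬ (pvSuffixes d).contains (pvNorm t) = true := by
          simpa [PySem.Set.contains_iff] using hm
        rw [if_neg (fun h => hm ((test_eq_mem d (pvNorm t)).mp h)), if_neg (fun h => hc h.2), ih]

-- ===== VERDICT (by name: the statement is the Claim_ definition above) =====
theorem is_target_domain_spec : Claim_equal_is_target_domain := by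
  intro domain target_domains _
  unfold Spec_is_target_domain is_target_domain is_target_domain_alt
  exact loops_eq (pvNorm domain) target_domains
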